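-- pv_equiv track=rewrite | github.com/msnidal/aoc2022 | day23/life.py | get_smallest_rectangle
-- ===== SOURCE A (Python) =====
-- def get_smallest_rectangle(elves):
--     enclosing_rectangle = [
--         (func(elf[0] for elf in elves), func(elf[1] for elf in elves))
--         for func in (min, max)
--     ]
--
--     count = 0
--     for row in range(enclosing_rectangle[0][1], enclosing_rectangle[1][1] + 1):
--         for column in range(enclosing_rectangle[0][0], enclosing_rectangle[1][0] + 1):
--             if (column, row) not in elves:
--                 count += 1
--
--     return count
-- ===== SOURCE B (Python) =====
-- def get_smallest_rectangle(elves):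
--     xs = [x for x, _ in elves]
--     ys = [y for _, y in elves]
--     area = (max(xs) - min(xs) + 1) * (max(ys) - min(ys) + 1)
--     return area - len(set(elves))
-- ===== Notes on version B (the rewrite author's own statement) =====
-- stated objective: faster
-- what changed: Replaces the per-cell double loop over the whole bounding rectangle (with a linear membership test inside) by the closed form area minus the number of distinct elf positions.
import Mathlib
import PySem

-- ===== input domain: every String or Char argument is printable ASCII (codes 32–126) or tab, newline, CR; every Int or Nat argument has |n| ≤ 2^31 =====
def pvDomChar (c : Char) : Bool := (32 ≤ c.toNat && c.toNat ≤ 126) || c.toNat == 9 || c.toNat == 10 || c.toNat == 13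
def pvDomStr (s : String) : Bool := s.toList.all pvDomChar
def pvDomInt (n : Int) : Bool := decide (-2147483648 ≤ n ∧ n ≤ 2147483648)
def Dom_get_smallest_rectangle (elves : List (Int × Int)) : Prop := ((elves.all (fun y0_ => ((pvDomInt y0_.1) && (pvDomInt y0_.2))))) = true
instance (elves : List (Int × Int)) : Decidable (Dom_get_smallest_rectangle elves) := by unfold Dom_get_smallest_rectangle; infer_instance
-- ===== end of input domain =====

-- B replaces A's per-cell double loop over the bounding rectangle by the closed form
-- area − (number of distinct elf positions); faster (asymptotic: O(n) vs O(area·n)).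


-- ===== PORT A =====
-- Literal port: compute min/max of both coordinates (Python min/max over a
-- generator; none on the empty list, excluded by Pre_), then scan every cell of
-- the enclosing rectangle and count the cells not occupied by an elf.
def get_smallest_rectangle (elves : List (Int × Int)) : Int :=
  match PySem.List.min? (elves.map Prod.fst) (fun x => x),
        PySem.List.min? (elves.map Prod.snd) (fun x => x),
        PySem.List.max? (elves.map Prod.fst) (fun x => x),
        PySem.List.max? (elves.map Prod.snd) (fun x => x) with
  | some minc, some minr, some maxc, some maxr =>
      (PySem.List.pyRange minr (maxr + 1) 1).foldl (fun count row =>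
        (PySem.List.pyRange minc (maxc + 1) 1).foldl (fun count column =>
          if (column, row) ∉ elves then count + 1 else count) count) 0
  | _, _, _, _ => 0   -- Python raises ValueError here (empty list); excluded by Pre_

-- ===== PORT B =====
-- Literal port of Source B: area of the bounding rectangle minus len(set(elves)).
def get_smallest_rectangle_alt (elves : List (Int × Int)) : Int :=
  let xs := elves.map Prod.fst
  let ys := elves.map Prod.snd
  -- on [] Python's max()/min() raise ValueError (excluded by Pre_); the .getD 0 is never read there
  let maxx := (PySem.List.max? xs (fun x => x)).getD 0
  let minx := (PySem.List.min? xs (fun x => x)).getD 0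
  let maxy := (PySem.List.max? ys (fun x => x)).getD 0
  let miny := (PySem.List.min? ys (fun x => x)).getD 0
  (maxx - minx + 1) * (maxy - miny + 1) - ((PySem.Set.ofList elves).length : Int)

-- ===== PRECONDITION & SPEC =====
-- On the empty list Python's min() raises ValueError (in both A and B); only that input is excluded.
def Pre_get_smallest_rectangle (elves : List (Int × Int)) : Prop := elves ≠ []
instance (elves : List (Int × Int)) : Decidable (Pre_get_smallest_rectangle elves) := by
  unfold Pre_get_smallest_rectangle; infer_instance
def pvWitness_get_smallest_rectangle : (List (Int × Int)) := [(0, 0), (2, 1)]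

def Spec_get_smallest_rectangle (elves : List (Int × Int)) (out : Int) : Prop := out = get_smallest_rectangle_alt elves
instance (elves : List (Int × Int)) (out : Int) : Decidable (Spec_get_smallest_rectangle elves out) := by unfold Spec_get_smallest_rectangle; infer_instance

-- ===== CLAIM (what is proved, stated in full; the proofs are below) =====
def Claim_equal_get_smallest_rectangle : Prop := ∀ (elves : List (Int × Int)), Dom_get_smallest_rectangle elves → Pre_get_smallest_rectangle elves → Spec_get_smallest_rectangle elves (get_smallest_rectangle elves)

-- ===== LEMMAS AND PROOFS =====

-- The outer loop accumulates, row by row, the inner loop's count of free columns.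
theorem pv_outer_foldl (elves : List (Int × Int)) (C : List Int) (R : List Int) :
    ∀ (init : Int),
      R.foldl (fun count row =>
        C.foldl (fun count column =>
          if (column, row) ∉ elves then count + 1 else count) count) init
      = init + ((R.map (fun row => C.countP (fun column => decide ((column, row) ∉ elves)))).sum : Int) := by
  induction R with
  | nil => intro init; simp
  | cons r rs ih =>
      intro init
      simp only [List.foldl_cons, List.map_cons, List.sum_cons]
      rw [ih, PySem.List.foldl_ite_add_one]
      push_cast
      ring

-- countP of the negated membership test, in Int form.
theorem pv_countP_not (elves : List (Int × Int)) (row : Int) (C : List Int) :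
    ((C.countP (fun column => decide ((column, row) ∉ elves))) : Int)
      = (C.length : Int) - ((C.countP (fun column => decide ((column, row) ∈ elves))) : Int) := by
  have h := List.length_eq_countP_add_countP (fun column => decide ((column, row) ∈ elves)) (l := C)
  have he : C.countP (fun column => decide (¬(decide ((column, row) ∈ elves)) = true))
      = C.countP (fun column => decide ((column, row) ∉ elves)) := by
    apply List.countP_congr; intro c _; simp
  rw [he] at h
  omega

-- Summing the per-row free counts over rows, in Int form: rows·cols minus occupied cells.
theorem pv_rows (elves : List (Int × Int)) (C R : List Int) :
    ((R.map (fun row => C.countP (fun column => decide ((column, row) ∉ elves)))).sum : Int)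
      = (R.length : Int) * (C.length : Int)
        - (((R.flatMap (fun row => C.map (fun column => (column, row)))).countP (fun p => decide (p ∈ elves))) : Int) := by
  induction R with
  | nil => simp
  | cons r rs ih =>
      simp only [List.map_cons, List.sum_cons, List.length_cons, List.flatMap_cons,
        List.countP_append]
      rw [Nat.cast_add, ih, pv_countP_not]
      have hm : List.countP (fun p => decide (p ∈ elves)) (C.map (fun column => (column, r)))
          = List.countP (fun column => decide ((column, r) ∈ elves)) C := by
        rw [List.countP_map]; rfl
      rw [hm]
      push_cast
      ring

-- The grid of cells of the rectangle has no duplicates.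
theorem pv_grid_nodup (minc maxc : Int) (R : List Int) (hR : R.Nodup) :
    (R.flatMap (fun row => (PySem.List.pyRange minc (maxc + 1) 1).map (fun column => (column, row)))).Nodup := by
  induction R with
  | nil => simp
  | cons r rs ih =>
      simp only [List.flatMap_cons, List.nodup_append]
      rcases List.nodup_cons.mp hR with ⟨hr, hrs⟩
      refine ⟨?_, ih hrs, ?_⟩
      · exact (PySem.List.nodup_pyRange_one _ _).map (fun a b h => (Prod.mk.injEq _ _ _ _).mp h |>.1)
      · intro p hp q hq hpq
        rcases List.mem_map.mp hp with ⟨c, _, rfl⟩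
        rcases List.mem_flatMap.mp hq with ⟨r', hr', hmem⟩
        rcases List.mem_map.mp hmem with ⟨c', _, heq⟩
        apply hr
        cases hpq
        cases heq
        exact hr' 

-- Two nodup lists with the same members have the same length.
theorem pv_length_eq_of_nodup_iff {α : Type} [DecidableEq α] (l₁ l₂ : List α)
    (h₁ : l₁.Nodup) (h₂ : l₂.Nodup) (h : ∀ a, a ∈ l₁ ↔ a ∈ l₂) : l₁.length = l₂.length :=
  ((List.perm_ext_iff_of_nodup h₁ h₂).mpr h).length_eq

theorem get_smallest_rectangle_spec_aux (elves : List (Int × Int)) (h : elves ≠ []) :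
    get_smallest_rectangle elves = get_smallest_rectangle_alt elves := by
  have hxs : elves.map Prod.fst ≠ [] := by simpa using h
  have hys : elves.map Prod.snd ≠ [] := by simpa using h
  obtain ⟨minc, hminc⟩ := Option.ne_none_iff_exists'.mp
    (fun hn => hxs ((PySem.List.min?_eq_none_iff (elves.map Prod.fst) (fun x : Int => x)).mp hn))
  obtain ⟨maxc, hmaxc⟩ := Option.ne_none_iff_exists'.mp
    (fun hn => hxs ((PySem.List.max?_eq_none_iff (elves.map Prod.fst) (fun x : Int => x)).mp hn))
  obtain ⟨minr, hminr⟩ := Option.ne_none_iff_exists'.mp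
    (fun hn => hys ((PySem.List.min?_eq_none_iff (elves.map Prod.snd) (fun x : Int => x)).mp hn))
  obtain ⟨maxr, hmaxr⟩ := Option.ne_none_iff_exists'.mp
    (fun hn => hys ((PySem.List.max?_eq_none_iff (elves.map Prod.snd) (fun x : Int => x)).mp hn))
  -- bounds: every elf lies in the rectangle, and min ≤ max on each axis
  have hcl : ∀ p ∈ elves, minc ≤ p.1 := fun p hp => by
    simpa using PySem.List.min?_isMin hminc p.1 (List.mem_map_of_mem hp)
  have hcu : ∀ p ∈ elves, p.1 ≤ maxc := fun p hp => by
    simpa using PySem.List.max?_isMax hmaxc p.1 (List.mem_map_of_mem hp)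
  have hrl : ∀ p ∈ elves, minr ≤ p.2 := fun p hp => by
    simpa using PySem.List.min?_isMin hminr p.2 (List.mem_map_of_mem hp)
  have hru : ∀ p ∈ elves, p.2 ≤ maxr := fun p hp => by
    simpa using PySem.List.max?_isMax hmaxr p.2 (List.mem_map_of_mem hp)
  obtain ⟨e, he⟩ := List.exists_mem_of_ne_nil elves h
  have hcc : minc ≤ maxc := le_trans (hcl e he) (hcu e he)
  have hrr : minr ≤ maxr := le_trans (hrl e he) (hru e he)
  set C := PySem.List.pyRange minc (maxc + 1) 1 with hC
  set R := PySem.List.pyRange minr (maxr + 1) 1 with hR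
  set grid := R.flatMap (fun row => C.map (fun column => (column, row))) with hgrid
  -- the occupied cells of the grid are exactly the distinct elf positions
  have hcount : ((grid.filter (fun p => decide (p ∈ elves))).length : Int)
      = ((PySem.Set.ofList elves).length : Int) := by
    have hmem : ∀ p, p ∈ grid.filter (fun q => decide (q ∈ elves)) ↔ p ∈ PySem.Set.ofList elves := by
      intro p
      rw [List.mem_filter, PySem.Set.mem_ofList]
      constructor
      · rintro ⟨-, hp⟩; exact of_decide_eq_true hp
      · intro hp
        refine ⟨?_, decide_eq_true hp⟩
        rw [hgrid, List.mem_flatMap]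
        refine ⟨p.2, ?_, List.mem_map.mpr ⟨p.1, ?_, rfl⟩⟩
        · exact PySem.List.mem_pyRange_one.mpr ⟨hrl p hp, by have := hru p hp; omega⟩
        · exact PySem.List.mem_pyRange_one.mpr ⟨hcl p hp, by have := hcu p hp; omega⟩
    exact_mod_cast pv_length_eq_of_nodup_iff _ _
      ((pv_grid_nodup minc maxc R (PySem.List.nodup_pyRange_one _ _)).filter _)
      (PySem.Set.nodup_ofList elves) hmem
  -- evaluate both sides
  rw [get_smallest_rectangle, get_smallest_rectangle_alt]
  simp only [hminc, hmaxc, hminr, hmaxr, Option.getD_some]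
  rw [pv_outer_foldl]
  have hlenC : ((C.length : Int)) = maxc + 1 - minc := by
    rw [hC, PySem.List.length_pyRange_one]; omega
  have hlenR : ((R.length : Int)) = maxr + 1 - minr := by
    rw [hR, PySem.List.length_pyRange_one]; omega
  rw [pv_rows elves C R, List.countP_eq_length_filter, ← hgrid, hcount, hlenC, hlenR]
  ring

-- ===== VERDICT (by name: the statement is the Claim_ definition above) =====
theorem get_smallest_rectangle_spec : Claim_equal_get_smallest_rectangle := by
  intro elves _ hpre
  exact get_smallest_rectangle_spec_aux elves hpre
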